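-- pv_equiv track=rewrite | github.com/ttzytt/PyAutoGrade | tests/obfuscated_tested_codes [copied at 2024-01-31 10#28#19.243191]/tested_code/4/Unit 1/List functions/list_functions.py | weird_double
-- ===== SOURCE A (Python) =====
-- def weird_double(numbers):
--     skip = 0
--     output = []
--     for i in range(len(numbers)):
--         if skip > 0:
--             output.append(numbers[i])
--             skip = skip - 1
--         elif numbers[i] % 3 == 0:
--             skip = 3
--             output.append(numbers[i])
--         else:
--             output.append(numbers[i] * 2)
--     return output
-- ===== SOURCE B (Python) =====
-- def weird_double(numbers):
--     output = []
--     i = 0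
--     n = len(numbers)
--     while i < n:
--         x = numbers[i]
--         if x % 3 == 0:
--             output.append(x)
--             copies = min(3, n - i - 1)
--             for j in range(copies):
--                 output.append(numbers[i + 1 + j])
--             i += 1 + copies
--         else:
--             output.append(x * 2)
--             i += 1
--     return output
-- ===== Notes on version B (the rewrite author's own statement) =====
-- stated objective: alternative
-- what changed: Replaces the per-element skip-counter state machine with an index-driven while loop that, on a multiple of 3, copies the next up-to-3 elements verbatim in an inner loop and jumps the index past them.
import Mathlib
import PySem

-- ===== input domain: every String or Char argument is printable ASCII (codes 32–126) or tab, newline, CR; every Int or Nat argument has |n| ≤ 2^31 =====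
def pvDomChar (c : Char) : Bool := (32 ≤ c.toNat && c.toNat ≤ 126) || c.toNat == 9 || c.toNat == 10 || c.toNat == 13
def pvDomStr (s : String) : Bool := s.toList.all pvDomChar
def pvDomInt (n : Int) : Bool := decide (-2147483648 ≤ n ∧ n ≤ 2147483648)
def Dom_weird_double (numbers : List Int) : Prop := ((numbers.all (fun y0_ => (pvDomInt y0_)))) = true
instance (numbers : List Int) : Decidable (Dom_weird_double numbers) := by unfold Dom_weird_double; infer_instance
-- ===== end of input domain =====

-- B replaces A's skip-counter state machine by an index loop that copies a block of up to 3
-- elements after each multiple of 3; objective: alternative decomposition, same cost.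

-- ===== PORT A =====
-- A walks the list element by element carrying the integer `skip` state.
def weirdDoubleLoopA : List Int → Int → List Int
  | [], _ => []
  | x :: xs, skip =>
      if skip > 0 then x :: weirdDoubleLoopA xs (skip - 1)
      else if PySem.Int.mod x 3 = 0 then x :: weirdDoubleLoopA xs 3
      else x * 2 :: weirdDoubleLoopA xs skip

def weird_double (numbers : List Int) : List Int := weirdDoubleLoopA numbers 0

-- ===== PORT B =====
-- B: while i < n; on a multiple of 3 copy the next min(3, remaining) elements verbatim and
-- jump past them (take/drop = Source B's inner copy loop over `copies` indices), else double.
def weirdDoubleLoopB : List Int → List Int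
  | [] => []
  | x :: xs =>
      if PySem.Int.mod x 3 = 0 then x :: (xs.take 3 ++ weirdDoubleLoopB (xs.drop 3))
      else x * 2 :: weirdDoubleLoopB xs
termination_by xs => xs.length
decreasing_by all_goals simp

def weird_double_alt (numbers : List Int) : List Int := weirdDoubleLoopB numbers

-- ===== PRECONDITION & SPEC =====
def Spec_weird_double (numbers : List Int) (out : List Int) : Prop := out = weird_double_alt numbers
instance (numbers : List Int) (out : List Int) : Decidable (Spec_weird_double numbers out) := by unfold Spec_weird_double; infer_instance

-- ===== CLAIM (what is proved, stated in full; the proofs are below) =====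
def Claim_equal_weird_double : Prop := ∀ (numbers : List Int), Dom_weird_double numbers → Spec_weird_double numbers (weird_double numbers)

-- ===== LEMMAS AND PROOFS =====

theorem weirdDoubleLoopB_cons (x : Int) (xs : List Int) :
    weirdDoubleLoopB (x :: xs) =
      if PySem.Int.mod x 3 = 0 then x :: (xs.take 3 ++ weirdDoubleLoopB (xs.drop 3))
      else x * 2 :: weirdDoubleLoopB xs := by
  rw [weirdDoubleLoopB.eq_def]

theorem weirdDoubleLoopA_eq (xs : List Int) : ∀ (k : Int), 0 ≤ k →
    weirdDoubleLoopA xs k = xs.take k.toNat ++ weirdDoubleLoopB (xs.drop k.toNat) := by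
  induction xs with
  | nil => intro k hk; simp [weirdDoubleLoopA, weirdDoubleLoopB]
  | cons x xs ih =>
    intro k hk
    by_cases h : k > 0
    · have hk1 : (0:Int) ≤ k - 1 := by omega
      have hnat : k.toNat = (k - 1).toNat + 1 := by omega
      simp only [weirdDoubleLoopA, if_pos h, ih (k - 1) hk1, hnat,
        List.take_succ_cons, List.drop_succ_cons, List.cons_append]
    · have hk0 : k = 0 := by omega
      subst hk0
      simp only [Int.toNat_zero, List.take_zero, List.drop_zero, List.nil_append]
      rw [weirdDoubleLoopA, if_neg h, weirdDoubleLoopB_cons]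
      by_cases h3 : PySem.Int.mod x 3 = 0
      · rw [if_pos h3, if_pos h3, ih 3 (by norm_num)]
        rfl
      · rw [if_neg h3, if_neg h3, ih 0 le_rfl]
        simp

-- ===== VERDICT (by name: the statement is the Claim_ definition above) =====
theorem weird_double_spec : Claim_equal_weird_double := by
  intro numbers _
  show weird_double numbers = weird_double_alt numbers
  simpa using weirdDoubleLoopA_eq numbers 0 le_rfl
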